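-- pv_equiv track=rewrite | github.com/peter-as/advent-of-code | 3.py | analyzeMul
-- ===== SOURCE A (Python) =====
-- def analyzeMul(s,i,indices):
--     j = indices[i] + 3
--     nums = set(["0","1","2","3","4","5","6","7","8","9"])
--     end = len(s)
--     step = 0
--     first = ""
--     second = ""
--     if i < len(indices)-1:
--         end = indices[i+1]
--     while j < end:
--         if step == 0:
--             if s[j] == '(':
--                 step = 1
--                 j += 1
--                 continue
--             else:
--                 return 0
--         if step == 1:
--             if s[j] not in nums:
--                 step = 2
--             else:
--                 first += s[j]
--
--         if step == 2:
--             if s[j] == ',':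
--                 step = 3
--                 j += 1
--                 continue
--             else:
--                 return 0
--         if step == 3:
--             if s[j] not in nums:
--                 step = 4
--             else:
--                 second += s[j]
--         if step == 4:
--             if not s[j] == ')':
--                 return 0
--             else:
--                 return int(first) * int(second)
--         j += 1
--     return 0
-- ===== SOURCE B (Python) =====
-- DIGITS = "0123456789"
--
-- def _split_digits(t):
--     rest = t.lstrip(DIGITS)
--     return t[:len(t) - len(rest)], rest
--
-- def analyzeMul(s, i, indices):
--     j = indices[i] + 3
--     end = indices[i + 1] if i < len(indices) - 1 else len(s)
--     seg = s[j:end]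
--     if not seg.startswith('('):
--         return 0
--     a, rest = _split_digits(seg[1:])
--     if not rest.startswith(','):
--         return 0
--     b, rest = _split_digits(rest[1:])
--     if not rest.startswith(')'):
--         return 0
--     return int(a) * int(b)
-- ===== Notes on version B (the rewrite author's own statement) =====
-- stated objective: simpler
-- what changed: Replaces A's character-by-character state machine (step variable, manual accumulation) by slicing the segment out once and decomposing it with startswith/lstrip into '(' digits ',' digits ')'.
-- outside the precondition, e.g. on analyzeMul('(50,4)l4)b', -1, [-3]): A returns 0, B returns 200; on analyzeMul('6,2)6m12ul (', 1, [11, -4]): A returns 12, B returns 0; on analyzeMul('0um94(81,))(0', -4, [2, -2, -6, 10]): A returns 0, B raises ValueError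
import Mathlib
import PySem

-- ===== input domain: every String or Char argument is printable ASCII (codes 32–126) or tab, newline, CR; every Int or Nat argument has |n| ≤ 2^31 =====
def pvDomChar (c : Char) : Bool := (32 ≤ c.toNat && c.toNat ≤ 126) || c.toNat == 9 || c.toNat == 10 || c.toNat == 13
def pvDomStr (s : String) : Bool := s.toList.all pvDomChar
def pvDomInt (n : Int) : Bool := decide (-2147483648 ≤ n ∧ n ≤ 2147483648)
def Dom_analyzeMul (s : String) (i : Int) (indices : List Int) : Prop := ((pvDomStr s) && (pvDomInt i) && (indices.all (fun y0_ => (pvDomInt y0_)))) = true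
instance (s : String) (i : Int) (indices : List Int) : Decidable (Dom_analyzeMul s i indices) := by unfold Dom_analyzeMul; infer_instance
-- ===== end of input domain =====

-- B replaces A's char-by-char state machine by slicing the segment out once and
-- splitting it with startswith/lstrip into '(' digits ',' digits ')' (objective: simpler).


-- ===== PORT A =====
-- nums = set(["0",…,"9"])
def pvNums : PySem.Set Char :=
  PySem.Set.ofList ['0', '1', '2', '3', '4', '5', '6', '7', '8', '9']

-- the while loop of A; fuel = number of remaining iterations (the loop advances j by
-- exactly 1 per iteration, so (end-j).toNat iterations happen before j < end fails)
def pvLoopA (cs : List Char) (endI : Int) : Nat → Int → Int → List Char → List Char → Int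
  | 0, _, _, _, _ => 0
  | fuel + 1, j, step, first, second =>
    if j < endI then
      let c := PySem.List.pyGetD cs j ' '        -- s[j]; in range under Pre_
      if step = 0 then
        if c = '(' then pvLoopA cs endI fuel (j + 1) 1 first second else 0
      else
        let fs := if step = 1 then
            (if PySem.Set.contains pvNums c = false then ((2 : Int), first)
             else (1, first ++ [c]))
          else (step, first)
        if fs.1 = 2 then
          if c = ',' then pvLoopA cs endI fuel (j + 1) 3 fs.2 second else 0
        else
          let gs := if fs.1 = 3 then
              (if PySem.Set.contains pvNums c = false then ((4 : Int), second)
               else (3, second ++ [c]))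
            else (fs.1, second)
          if gs.1 = 4 then
            if ¬ c = ')' then 0
            else (PySem.Int.ofChars? fs.2).getD 0 * (PySem.Int.ofChars? gs.2).getD 0  -- int(first)*int(second); ValueError excluded by Pre_
          else pvLoopA cs endI fuel (j + 1) gs.1 fs.2 gs.2
    else 0

def analyzeMul (s : String) (i : Int) (indices : List Int) : Int :=
  let j := PySem.List.pyGetD indices i 0 + 3     -- indices[i] + 3; IndexError excluded by Pre_
  let endI := if i < (indices.length : Int) - 1 then PySem.List.pyGetD indices (i + 1) 0
              else (s.toList.length : Int)
  pvLoopA s.toList endI (endI - j).toNat j 0 [] []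

-- ===== PORT B =====
def pvDIGITS : List Char := ['0', '1', '2', '3', '4', '5', '6', '7', '8', '9']

-- _split_digits: rest = t.lstrip(DIGITS); prefix = t[:len(t)-len(rest)]
def pvSplitDigits (t : List Char) : List Char × List Char :=
  (t.takeWhile (fun c => pvDIGITS.contains c), t.dropWhile (fun c => pvDIGITS.contains c))

def analyzeMul_alt (s : String) (i : Int) (indices : List Int) : Int :=
  let j := PySem.List.pyGetD indices i 0 + 3
  let endI := if i < (indices.length : Int) - 1 then PySem.List.pyGetD indices (i + 1) 0
              else (s.toList.length : Int)
  let seg := PySem.List.slice s.toList (some j) (some endI)          -- seg = s[j:end]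
  if seg.head? = some '(' then                                       -- seg.startswith('(')
    let p := pvSplitDigits (PySem.List.slice seg (some 1) none)      -- _split_digits(seg[1:])
    if p.2.head? = some ',' then                                     -- rest.startswith(',')
      let q := pvSplitDigits (PySem.List.slice p.2 (some 1) none)    -- _split_digits(rest[1:])
      if q.2.head? = some ')' then                                   -- rest.startswith(')')
        (PySem.Int.ofChars? p.1).getD 0 * (PySem.Int.ofChars? q.1).getD 0   -- int(a) * int(b); ValueError excluded by Pre_
      else 0
    else 0
  else 0

-- ===== PRECONDITION & SPEC =====
def pvStart (i : Int) (indices : List Int) : Int := PySem.List.pyGetD indices i 0 + 3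

def pvEnd (s : String) (i : Int) (indices : List Int) : Int :=
  if i < (indices.length : Int) - 1 then PySem.List.pyGetD indices (i + 1) 0
  else (s.toList.length : Int)

-- the segment has shape '(' digits ',' digits ')' with an EMPTY digit field: there A
-- (and B) raise ValueError on int('')
def pvBadEmpty (t : List Char) : Bool :=
  match t with
  | '(' :: body =>
    match body.dropWhile (fun c => pvDIGITS.contains c) with
    | ',' :: r2 =>
      match r2.dropWhile (fun c => pvDIGITS.contains c) with
      | ')' :: _ => (body.takeWhile (fun c => pvDIGITS.contains c)).isEmpty
                    || (r2.takeWhile (fun c => pvDIGITS.contains c)).isEmpty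
      | _ => false
    | _ => false
  | _ => false

-- Pre_ excludes: i out of range for indices (A raises IndexError); indices[i] < -3,
-- where A reads s[j] with a negative index (wraparound quirk) while B slices; a negative
-- or past-the-end upper bound indices[i+1], where A returns 0 or raises IndexError while
-- B's slice wraps/clamps; and segments '(' digits ',' digits ')' with an empty digit
-- field, where both A and B raise ValueError on int('').
def Pre_analyzeMul (s : String) (i : Int) (indices : List Int) : Prop :=
  PySem.Raise.InRange indices.length i ∧
  -3 ≤ PySem.List.pyGetD indices i 0 ∧
  0 ≤ pvEnd s i indices ∧
  (pvStart i indices < pvEnd s i indices → pvEnd s i indices ≤ (s.toList.length : Int)) ∧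
  pvBadEmpty (PySem.List.slice s.toList (some (pvStart i indices)) (some (pvEnd s i indices))) = false

instance (s : String) (i : Int) (indices : List Int) : Decidable (Pre_analyzeMul s i indices) := by
  unfold Pre_analyzeMul; infer_instance

def pvWitness_analyzeMul : String × Int × List Int := ("mul(2,3)", 0, [0])

def Spec_analyzeMul (s : String) (i : Int) (indices : List Int) (out : Int) : Prop := out = analyzeMul_alt s i indices
instance (s : String) (i : Int) (indices : List Int) (out : Int) : Decidable (Spec_analyzeMul s i indices out) := by unfold Spec_analyzeMul; infer_instance

-- ===== CLAIM (what is proved, stated in full; the proofs are below) =====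
def Claim_equal_analyzeMul : Prop := ∀ (s : String) (i : Int) (indices : List Int), Dom_analyzeMul s i indices → Pre_analyzeMul s i indices → Spec_analyzeMul s i indices (analyzeMul s i indices)

-- ===== LEMMAS AND PROOFS =====

-- A's loop body re-expressed as structural recursion over the remaining segment
def pvRun : List Char → Int → List Char → List Char → Int
  | [], _, _, _ => 0
  | c :: r, step, first, second =>
    if step = 0 then
      if c = '(' then pvRun r 1 first second else 0
    else
      let fs := if step = 1 then
          (if PySem.Set.contains pvNums c = false then ((2 : Int), first)
           else (1, first ++ [c]))
        else (step, first)
      if fs.1 = 2 then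
        if c = ',' then pvRun r 3 fs.2 second else 0
      else
        let gs := if fs.1 = 3 then
            (if PySem.Set.contains pvNums c = false then ((4 : Int), second)
             else (3, second ++ [c]))
          else (fs.1, second)
        if gs.1 = 4 then
          if ¬ c = ')' then 0
          else (PySem.Int.ofChars? fs.2).getD 0 * (PySem.Int.ofChars? gs.2).getD 0
        else pvRun r gs.1 fs.2 gs.2

theorem pvNums_contains (c : Char) :
    PySem.Set.contains pvNums c = pvDIGITS.contains c := by
  have h : pvNums = pvDIGITS := by decide
  simp [h]

theorem pvLoopA_eq_run (cs : List Char) (e : Int) (hel : e ≤ (cs.length : Int)) :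
    ∀ (fuel : Nat) (j step : Int) (f g : List Char), 0 ≤ j → fuel = (e - j).toNat →
    pvLoopA cs e fuel j step f g = pvRun ((cs.drop j.toNat).take ((e - j).toNat)) step f g := by
  intro fuel
  induction fuel with
  | zero =>
    intro j step f g hj hf
    rw [← hf]
    simp [pvLoopA, pvRun]
  | succ fuel ih =>
    intro j step f g hj hf
    have hje : j < e := by omega
    have hjl : j.toNat < cs.length := by omega
    have hseg : (cs.drop j.toNat).take ((e - j).toNat)
        = cs[j.toNat] :: ((cs.drop (j + 1).toNat).take ((e - (j + 1)).toNat)) := by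
      have h1 : cs.drop j.toNat = cs[j.toNat] :: cs.drop (j.toNat + 1) :=
        List.drop_eq_getElem_cons hjl
      have h2 : (j + 1).toNat = j.toNat + 1 := by omega
      have h3 : (e - j).toNat = (e - (j + 1)).toNat + 1 := by omega
      rw [h1, h3, h2, List.take_succ_cons]
    have hc : PySem.List.pyGetD cs j ' ' = cs[j.toNat] :=
      PySem.List.pyGetD_eq_getElem cs ' ' hj (by omega)
    have hfuel1 : fuel = (e - (j + 1)).toNat := by omega
    rw [hseg]
    show pvLoopA cs e (fuel + 1) j step f g = _
    rw [pvLoopA, pvRun]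
    simp only [if_pos hje, hc]
    split_ifs <;>
      first
        | rfl
        | (exact ih (j + 1) _ _ _ (by omega) hfuel1)

theorem pvRun_one (t : List Char) : ∀ f g, pvRun t 1 f g =
    (if (t.dropWhile (fun c => PySem.Set.contains pvNums c)).head? = some ',' then
       pvRun (t.dropWhile (fun c => PySem.Set.contains pvNums c)).tail 3
         (f ++ t.takeWhile (fun c => PySem.Set.contains pvNums c)) g
     else 0) := by
  induction t with
  | nil => intro f g; simp [pvRun]
  | cons c r ih =>
    intro f g
    by_cases hd : PySem.Set.contains pvNums c = true
    · have hm : c ∈ pvNums := by simpa using hd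
      rw [List.dropWhile_cons_of_pos hd, List.takeWhile_cons_of_pos hd]
      have hstep : pvRun (c :: r) 1 f g = pvRun r 1 (f ++ [c]) g := by
        rw [pvRun]; simp [hm]
      rw [hstep, ih]
      split_ifs
      · simp only [List.append_assoc, List.singleton_append]
      · rfl
    · have hnm : c ∉ pvNums := by simpa using hd
      rw [List.dropWhile_cons_of_neg hd, List.takeWhile_cons_of_neg hd]
      rw [pvRun]
      by_cases hc : c = ','
      · subst hc; simp [hnm]
      · simp [hnm, hc]

theorem pvRun_three (t : List Char) : ∀ f g, pvRun t 3 f g =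
    (if (t.dropWhile (fun c => PySem.Set.contains pvNums c)).head? = some ')' then
       (PySem.Int.ofChars? f).getD 0 *
         (PySem.Int.ofChars? (g ++ t.takeWhile (fun c => PySem.Set.contains pvNums c))).getD 0
     else 0) := by
  induction t with
  | nil => intro f g; simp [pvRun]
  | cons c r ih =>
    intro f g
    by_cases hd : PySem.Set.contains pvNums c = true
    · have hm : c ∈ pvNums := by simpa using hd
      rw [List.dropWhile_cons_of_pos hd, List.takeWhile_cons_of_pos hd]
      have hstep : pvRun (c :: r) 3 f g = pvRun r 3 f (g ++ [c]) := by
        rw [pvRun]; simp [hm]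
      rw [hstep, ih]
      split_ifs
      · simp only [List.append_assoc, List.singleton_append]
      · rfl
    · have hnm : c ∉ pvNums := by simpa using hd
      rw [List.dropWhile_cons_of_neg hd, List.takeWhile_cons_of_neg hd]
      rw [pvRun]
      by_cases hc : c = ')'
      · subst hc; simp [hnm]
      · simp [hnm, hc]

theorem pvPred_eq : (fun c => PySem.Set.contains pvNums c) = (fun c => pvDIGITS.contains c) := by
  funext c; exact pvNums_contains c

theorem pvRun_parse (t : List Char) : pvRun t 0 [] [] =
    (if t.head? = some '(' then
       let p := pvSplitDigits (PySem.List.slice t (some 1) none)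
       if p.2.head? = some ',' then
         let q := pvSplitDigits (PySem.List.slice p.2 (some 1) none)
         if q.2.head? = some ')' then
           (PySem.Int.ofChars? p.1).getD 0 * (PySem.Int.ofChars? q.1).getD 0
         else 0
       else 0
     else 0) := by
  rcases t with _ | ⟨c, body⟩
  · simp [pvRun]
  · by_cases hc : c = '('
    · subst hc
      have h0 : pvRun ('(' :: body) 0 [] [] = pvRun body 1 [] [] := by
        rw [pvRun]; simp
      rw [h0, pvRun_one]
      simp only [pvSplitDigits, PySem.List.slice_from_one, List.head?_cons,
        List.tail_cons, ← pvPred_eq, List.nil_append]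
      by_cases h1 : (List.dropWhile (fun c => PySem.Set.contains pvNums c) body).head? = some ','
      · rw [if_pos h1, if_pos h1, pvRun_three]
        simp only [List.nil_append, if_true]
      · rw [if_neg h1, if_neg h1]
        simp only [if_true]
    · rw [pvRun]
      simp [hc]

-- ===== VERDICT (by name: the statement is the Claim_ definition above) =====
theorem analyzeMul_spec : Claim_equal_analyzeMul := by
  intro s i indices _hdom hpre
  obtain ⟨hir, hneg, he0, hel, _hbad⟩ := hpre
  have ha : analyzeMul s i indices
      = pvLoopA s.toList (pvEnd s i indices)
          ((pvEnd s i indices - pvStart i indices).toNat) (pvStart i indices) 0 [] [] := rfl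
  have hb : analyzeMul_alt s i indices
      = pvRun (PySem.List.slice s.toList (some (pvStart i indices))
          (some (pvEnd s i indices))) 0 [] [] := by
    rw [pvRun_parse]
    rfl
  unfold Spec_analyzeMul
  rw [ha, hb]
  set J := pvStart i indices with hJ
  set E := pvEnd s i indices with hE
  have hj0 : 0 ≤ J := by rw [hJ]; unfold pvStart; omega
  have hslice : PySem.List.slice s.toList (some J) (some E)
      = (s.toList.drop J.toNat).take (E.toNat - J.toNat) :=
    PySem.List.slice_toNat s.toList hj0 he0
  by_cases hje : J < E
  · have helen : E ≤ (s.toList.length : Int) := hel hje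
    have htn : E.toNat - J.toNat = (E - J).toNat := by omega
    rw [pvLoopA_eq_run s.toList E helen _ J 0 [] [] hj0 rfl, hslice, htn]
  · have hfz : (E - J).toNat = 0 := by omega
    have hsz : E.toNat - J.toNat = 0 := by omega
    rw [hfz, hslice, hsz]
    simp [pvLoopA, pvRun]
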